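-- pv_equiv track=rewrite | github.com/cjfmartinez/golfapp | golfapp.py | snake_draft_singles_matchups
-- ===== SOURCE A (Python) =====
-- def snake_draft_singles_matchups(team_a, team_b, handicaps, leader="A"):
--     """
--     Captains snake-draft head-to-head singles matchups.
--     Returns list of tuples: [(player_a, player_b), ...] length 4.
--
--     team_a, team_b: lists of 4 players each
--     leader: "A" or "B" (leader after Round 2)
--     """
--
--     pool_a = team_a.copy()
--     pool_b = team_b.copy()
--
--     matchups = []
--
--     def best_player(pool):
--         """Simple rational pick: lowest handicap available."""
--         return min(pool, key=lambda p: handicaps[p])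
--
--     # Snake order for 4 matches
--     # Leader initiates matches 1 and 3
--     initiators = [
--         leader,
--         "B" if leader == "A" else "A",
--         leader,
--         "B" if leader == "A" else "A"
--     ]
--
--     for initiator in initiators:
--         if initiator == "A":
--             a_pick = best_player(pool_a)
--             pool_a.remove(a_pick)
--
--             b_pick = best_player(pool_b)
--             pool_b.remove(b_pick)
--         else:
--             b_pick = best_player(pool_b)
--             pool_b.remove(b_pick)
--
--             a_pick = best_player(pool_a)
--             pool_a.remove(a_pick)
--
--         matchups.append((a_pick, b_pick))
--
--     return matchups
-- ===== SOURCE B (Python) =====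
-- def snake_draft_singles_matchups(team_a, team_b, handicaps, leader="A"):
--     """Each pool is drained by repeatedly taking its lowest-handicap player,
--     so the picks are just the teams stably sorted by handicap; the leader
--     parameter never affects the pairs."""
--     sa = sorted(team_a, key=lambda p: handicaps[p])
--     sb = sorted(team_b, key=lambda p: handicaps[p])
--     return list(zip(sa[:4], sb[:4]))
-- ===== Notes on version B (the rewrite author's own statement) =====
-- stated objective: simpler
-- what changed: Replaces the 4-round draft simulation (repeated min+remove on two mutable pools, with inert leader/initiator branching) by one stable sort of each team by handicap and an index-wise zip of the 4 lowest players.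
import Mathlib
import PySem

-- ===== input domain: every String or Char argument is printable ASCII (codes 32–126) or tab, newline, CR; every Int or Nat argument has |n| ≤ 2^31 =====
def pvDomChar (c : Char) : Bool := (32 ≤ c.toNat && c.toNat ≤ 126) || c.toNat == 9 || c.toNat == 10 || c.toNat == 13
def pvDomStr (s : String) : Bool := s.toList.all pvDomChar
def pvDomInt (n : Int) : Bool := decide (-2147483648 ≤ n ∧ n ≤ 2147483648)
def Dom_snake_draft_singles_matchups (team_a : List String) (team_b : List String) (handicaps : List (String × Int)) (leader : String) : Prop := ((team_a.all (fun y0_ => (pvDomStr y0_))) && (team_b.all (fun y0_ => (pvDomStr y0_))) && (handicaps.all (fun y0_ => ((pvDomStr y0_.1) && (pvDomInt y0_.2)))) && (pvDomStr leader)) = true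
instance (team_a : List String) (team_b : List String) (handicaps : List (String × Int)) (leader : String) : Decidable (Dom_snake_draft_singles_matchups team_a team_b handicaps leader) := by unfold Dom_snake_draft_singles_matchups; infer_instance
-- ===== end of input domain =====

-- B replaces A's 4-round min+remove draft simulation by one stable sort per team
-- zipped index-wise (simpler; the leader parameter is inert). Return values only;
-- neither version mutates its arguments (A copies its pools).

-- handicaps[p]: first-match association-list lookup (default 0 is never reached under Pre_)
def pvHKey (handicaps : List (String × Int)) (p : String) : Int :=
  (((handicaps.find? (fun kv => kv.1 == p)).map Prod.snd).getD 0)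

-- ===== PORT A =====
-- the loop body of A: for each initiator, pick min-handicap from each pool, remove it, append the pair
def pvDraftLoop (key : String → Int) : List String → List String → List String → List (String × String) → List (String × String)
  | [], _, _, matchups => matchups
  | initiator :: rest, pool_a, pool_b, matchups =>
    if initiator == "A" then
      let a_pick := (PySem.List.min? pool_a key).getD ""
      let pool_a' := (PySem.List.remove? pool_a a_pick).getD pool_a
      let b_pick := (PySem.List.min? pool_b key).getD ""
      let pool_b' := (PySem.List.remove? pool_b b_pick).getD pool_b
      pvDraftLoop key rest pool_a' pool_b' (matchups ++ [(a_pick, b_pick)])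
    else
      let b_pick := (PySem.List.min? pool_b key).getD ""
      let pool_b' := (PySem.List.remove? pool_b b_pick).getD pool_b
      let a_pick := (PySem.List.min? pool_a key).getD ""
      let pool_a' := (PySem.List.remove? pool_a a_pick).getD pool_a
      pvDraftLoop key rest pool_a' pool_b' (matchups ++ [(a_pick, b_pick)])

def snake_draft_singles_matchups (team_a : List String) (team_b : List String) (handicaps : List (String × Int)) (leader : String) : List (String × String) :=
  let initiators := [leader, if leader == "A" then "B" else "A", leader, if leader == "A" then "B" else "A"]
  pvDraftLoop (fun p => pvHKey handicaps p) initiators team_a team_b []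

-- ===== PORT B =====
def snake_draft_singles_matchups_alt (team_a : List String) (team_b : List String) (handicaps : List (String × Int)) (leader : String) : List (String × String) :=
  let sa := PySem.List.sorted team_a (fun p => pvHKey handicaps p)
  let sb := PySem.List.sorted team_b (fun p => pvHKey handicaps p)
  (sa.take 4).zip (sb.take 4)

-- ===== PRECONDITION & SPEC =====
-- Pre_ excludes exactly the inputs where A raises: a team with fewer than 4 players
-- (ValueError: min of an empty pool) or a team member missing from handicaps (KeyError).
def Pre_snake_draft_singles_matchups (team_a : List String) (team_b : List String) (handicaps : List (String × Int)) (leader : String) : Prop :=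
  4 ≤ team_a.length ∧ 4 ≤ team_b.length ∧
  (∀ p ∈ team_a, p ∈ handicaps.map Prod.fst) ∧ (∀ p ∈ team_b, p ∈ handicaps.map Prod.fst)
instance (team_a : List String) (team_b : List String) (handicaps : List (String × Int)) (leader : String) : Decidable (Pre_snake_draft_singles_matchups team_a team_b handicaps leader) := by unfold Pre_snake_draft_singles_matchups; infer_instance

def pvWitness_snake_draft_singles_matchups : List String × List String × (List (String × Int)) × String :=
  (["a", "b", "c", "d"], ["e", "f", "g", "h"],
   [("a", 3), ("b", 1), ("c", 4), ("d", 1), ("e", 5), ("f", 9), ("g", 2), ("h", 6)], "A")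

def Spec_snake_draft_singles_matchups (team_a : List String) (team_b : List String) (handicaps : List (String × Int)) (leader : String) (out : List (String × String)) : Prop := out = snake_draft_singles_matchups_alt team_a team_b handicaps leader
instance (team_a : List String) (team_b : List String) (handicaps : List (String × Int)) (leader : String) (out : List (String × String)) : Decidable (Spec_snake_draft_singles_matchups team_a team_b handicaps leader out) := by unfold Spec_snake_draft_singles_matchups; infer_instance

-- ===== CLAIM (what is proved, stated in full; the proofs are below) =====
def Claim_equal_snake_draft_singles_matchups : Prop := ∀ (team_a : List String) (team_b : List String) (handicaps : List (String × Int)) (leader : String), Dom_snake_draft_singles_matchups team_a team_b handicaps leader → Pre_snake_draft_singles_matchups team_a team_b handicaps leader → Spec_snake_draft_singles_matchups team_a team_b handicaps leader (snake_draft_singles_matchups team_a team_b handicaps leader)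

-- ===== LEMMAS AND PROOFS =====

-- the running-minimum register step of Python's min(pool, key=...)
def pvMinStep (key : String → Int) (acc : Option String) (x : String) : Option String :=
  match acc with
  | none => some x
  | some m => if key x < key m then some x else some m

theorem pvMinEq (xs : List String) (key : String → Int) :
    PySem.List.min? xs key = xs.foldl (pvMinStep key) none := by
  unfold PySem.List.min?
  congr 1
  funext acc x
  cases acc <;> rfl

-- min? = foldl of a running-minimum register: if it ends on m, either the register never
-- moved off its seed, or m sits at the first position attaining the (strict) minimum.
theorem pvMinFold {key : String → Int} :
    ∀ (l : List String) (c m : String),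
      l.foldl (pvMinStep key) (some c) = some m →
      (m = c ∧ ∀ x ∈ l, ¬ key x < key c) ∨
      (∃ pre post, l = pre ++ m :: post ∧ key m < key c ∧
        (∀ x ∈ pre, key m < key x) ∧ (∀ x ∈ post, key m ≤ key x)) := by
  intro l
  induction l with
  | nil => intro c m h; left; simp at h; exact ⟨h.symm, by simp⟩
  | cons x t ih =>
    intro c m h
    simp only [List.foldl_cons, pvMinStep] at h
    by_cases hx : key x < key c
    · rw [if_pos hx] at h
      rcases ih x m h with ⟨rfl, hall⟩ | ⟨pre, post, rfl, hlt, hpre, hpost⟩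
      · right; exact ⟨[], t, rfl, hx, by simp, fun y hy => le_of_not_gt (hall y hy)⟩
      · right
        refine ⟨x :: pre, post, by simp, lt_trans hlt hx, ?_, hpost⟩
        intro y hy
        rcases List.mem_cons.1 hy with rfl | hy
        · exact hlt
        · exact hpre y hy
    · rw [if_neg hx] at h
      rcases ih c m h with ⟨rfl, hall⟩ | ⟨pre, post, rfl, hlt, hpre, hpost⟩
      · left
        refine ⟨rfl, ?_⟩
        intro y hy
        rcases List.mem_cons.1 hy with rfl | hy
        · exact hx
        · exact hall y hy
      · right
        refine ⟨x :: pre, post, by simp, hlt, ?_, hpost⟩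
        intro y hy
        rcases List.mem_cons.1 hy with rfl | hy
        · exact lt_of_lt_of_le hlt (le_of_not_gt hx)
        · exact hpre y hy

-- min? returns the FIRST element attaining the minimum key: everything before it is
-- strictly larger, everything after it is at least as large.
theorem pvMinDecomp {key : String → Int} {l : List String} {m : String}
    (h : PySem.List.min? l key = some m) :
    ∃ pre post, l = pre ++ m :: post ∧
      (∀ x ∈ pre, key m < key x) ∧ (∀ x ∈ post, key m ≤ key x) := by
  cases l with
  | nil => simp [PySem.List.min?] at h
  | cons x t =>
    have h' : t.foldl (pvMinStep key) (some x) = some m := by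
      rw [pvMinEq, List.foldl_cons] at h
      simpa [pvMinStep] using h
    rcases pvMinFold t x m h' with ⟨rfl, hall⟩ | ⟨pre, post, rfl, hlt, hpre, hpost⟩
    · exact ⟨[], t, rfl, by simp, fun y hy => le_of_not_gt (hall y hy)⟩
    · refine ⟨x :: pre, post, by simp, ?_, hpost⟩
      intro y hy
      rcases List.mem_cons.1 hy with rfl | hy
      · exact hlt
      · exact hpre y hy

-- pushing elements that are not strictly below m leaves a leading m in place
theorem pvFoldlInsertCons {key : String → Int} {m : String} :
    ∀ (post acc : List String), (∀ x ∈ post, ¬ key x < key m) →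
      post.foldl (fun acc x => PySem.List.insertBy (fun a b => decide (key a < key b)) x acc) (m :: acc)
        = m :: post.foldl (fun acc x => PySem.List.insertBy (fun a b => decide (key a < key b)) x acc) acc := by
  intro post
  induction post with
  | nil => intro acc _; rfl
  | cons x t ih =>
    intro acc hall
    have hx : ¬ key x < key m := hall x (List.mem_cons_self)
    simp only [List.foldl_cons]
    rw [show PySem.List.insertBy (fun a b => decide (key a < key b)) x (m :: acc)
          = m :: PySem.List.insertBy (fun a b => decide (key a < key b)) x acc from by
        simp [PySem.List.insertBy, hx]]
    exact ih _ (fun y hy => hall y (List.mem_cons_of_mem _ hy))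

-- inserting the strict minimum m in front of a sorted list of strictly larger elements
theorem pvInsertMin {key : String → Int} {m : String} {pre : List String}
    (hpre : ∀ x ∈ pre, key m < key x) :
    PySem.List.insertBy (fun a b => decide (key a < key b)) m (PySem.List.sorted pre key)
      = m :: PySem.List.sorted pre key := by
  cases hs : PySem.List.sorted pre key with
  | nil => simp [PySem.List.insertBy]
  | cons y ys =>
    have hy : y ∈ pre := by
      have : y ∈ PySem.List.sorted pre key := by rw [hs]; exact List.mem_cons_self
      exact (PySem.List.mem_sorted _ _ _ _).1 this
    simp [PySem.List.insertBy, hpre y hy]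

-- extraction: the stable sort of l is the first minimum followed by the stable sort of the rest
theorem pvSortedExtract {key : String → Int} {l : List String} {m : String}
    (h : PySem.List.min? l key = some m) :
    PySem.List.sorted l key = m :: PySem.List.sorted (l.erase m) key := by
  rcases pvMinDecomp h with ⟨pre, post, rfl, hpre, hpost⟩
  have hmnotpre : m ∉ pre := fun hm => lt_irrefl _ (hpre m hm)
  have herase : (pre ++ m :: post).erase m = pre ++ post := by
    rw [List.erase_append_right _ hmnotpre, List.erase_cons_head]
  rw [herase]
  rw [PySem.List.sorted_eq_foldl_insertBy, PySem.List.sorted_eq_foldl_insertBy]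
  rw [List.foldl_append, List.foldl_append, List.foldl_cons]
  rw [show (pre.foldl (fun acc x => PySem.List.insertBy (fun a b => decide (key a < key b)) x acc) [])
        = PySem.List.sorted pre key from (PySem.List.sorted_eq_foldl_insertBy pre key).symm]
  rw [pvInsertMin hpre]
  exact pvFoldlInsertCons post _ (fun x hx => not_lt.2 (hpost x hx))

-- the draft loop drains the k lowest-handicap players from each pool, in sorted order
theorem pvLoopEq {key : String → Int} :
    ∀ (inits : List String) (pa pb : List String) (ms : List (String × String)),
      inits.length ≤ pa.length → inits.length ≤ pb.length →
      pvDraftLoop key inits pa pb ms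
        = ms ++ ((PySem.List.sorted pa key).take inits.length).zip
                  ((PySem.List.sorted pb key).take inits.length) := by
  intro inits
  induction inits with
  | nil => intro pa pb ms _ _; simp [pvDraftLoop]
  | cons i rest ih =>
    intro pa pb ms hpa hpb
    have hpa0 : pa ≠ [] := by intro h; subst h; simp at hpa
    have hpb0 : pb ≠ [] := by intro h; subst h; simp at hpb
    obtain ⟨ma, hma⟩ : ∃ ma, PySem.List.min? pa key = some ma := by
      cases h : PySem.List.min? pa key with
      | none => exact absurd ((PySem.List.min?_eq_none_iff _ _).1 h) hpa0
      | some v => exact ⟨v, rfl⟩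
    obtain ⟨mb, hmb⟩ : ∃ mb, PySem.List.min? pb key = some mb := by
      cases h : PySem.List.min? pb key with
      | none => exact absurd ((PySem.List.min?_eq_none_iff _ _).1 h) hpb0
      | some v => exact ⟨v, rfl⟩
    have hra : PySem.List.remove? pa ma = some (pa.erase ma) :=
      PySem.List.remove?_eq_some_erase pa ma (PySem.List.min?_mem hma)
    have hrb : PySem.List.remove? pb mb = some (pb.erase mb) :=
      PySem.List.remove?_eq_some_erase pb mb (PySem.List.min?_mem hmb)
    have hla : rest.length ≤ (pa.erase ma).length := by
      rw [List.length_erase_of_mem (PySem.List.min?_mem hma)]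
      simp at hpa; omega
    have hlb : rest.length ≤ (pb.erase mb).length := by
      rw [List.length_erase_of_mem (PySem.List.min?_mem hmb)]
      simp at hpb; omega
    have hstep : pvDraftLoop key (i :: rest) pa pb ms
        = pvDraftLoop key rest (pa.erase ma) (pb.erase mb) (ms ++ [(ma, mb)]) := by
      simp only [pvDraftLoop, hma, hmb, hra, hrb, Option.getD_some]
      split <;> rfl
    rw [hstep, ih _ _ _ hla hlb]
    rw [pvSortedExtract hma, pvSortedExtract hmb]
    simp [List.zip_cons_cons, List.append_assoc]

-- ===== VERDICT (by name: the statement is the Claim_ definition above) =====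
theorem snake_draft_singles_matchups_spec : Claim_equal_snake_draft_singles_matchups := by
  intro team_a team_b handicaps leader _ hpre
  unfold Spec_snake_draft_singles_matchups snake_draft_singles_matchups snake_draft_singles_matchups_alt
  rw [pvLoopEq _ team_a team_b [] (by simpa using hpre.1) (by simpa using hpre.2.1)]
  simp
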